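-- pv_equiv track=rewrite | github.com/Geetie/gpu_profiling_system | src/infrastructure/tools/compile_cuda.py | _fix_cuda_enum_names
-- ===== SOURCE A (Python) =====
-- def _fix_cuda_enum_names(source: str) -> str:
--     """Fix undefined CUDA device attribute enum names in source code.
--
--     Some CUDA versions don't have all enum names. Replace them with
--     numeric casts that work on all CUDA versions.
--     """
--     enum_replacements = {
--         "cudaDevAttrMemoryBusWidth": "(enum cudaDeviceAttr)37",
--         "cudaDevAttrGlobalMemoryBusWidth": "(enum cudaDeviceAttr)37",
--         "cudaDevAttrMemoryClockRate": "(enum cudaDeviceAttr)36",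
--         "cudaDevAttrClockRate": "(enum cudaDeviceAttr)13",
--         "cudaDevAttrMultiProcessorCount": "(enum cudaDeviceAttr)16",
--     }
--     for old_name, new_value in enum_replacements.items():
--         if old_name in source:
--             source = source.replace(old_name, new_value)
--     return source
-- ===== SOURCE B (Python) =====
-- def _fix_cuda_enum_names(source: str) -> str:
--     """Fix undefined CUDA device attribute enum names in source code.
--
--     Single left-to-right pass: at each position emit the replacement for
--     whichever enum name starts there (the names never overlap), instead of
--     one full-string replace pass per name.
--     """
--     enum_replacements = {
--         "cudaDevAttrMemoryBusWidth": "(enum cudaDeviceAttr)37",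
--         "cudaDevAttrGlobalMemoryBusWidth": "(enum cudaDeviceAttr)37",
--         "cudaDevAttrMemoryClockRate": "(enum cudaDeviceAttr)36",
--         "cudaDevAttrClockRate": "(enum cudaDeviceAttr)13",
--         "cudaDevAttrMultiProcessorCount": "(enum cudaDeviceAttr)16",
--     }
--     out = []
--     i = 0
--     n = len(source)
--     while i < n:
--         for old_name, new_value in enum_replacements.items():
--             if source.startswith(old_name, i):
--                 out.append(new_value)
--                 i += len(old_name)
--                 break
--         else:
--             out.append(source[i])
--             i += 1
--     return "".join(out)
-- ===== Notes on version B (the rewrite author's own statement) =====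
-- stated objective: alternative
-- what changed: Replaces five sequential guarded full-string str.replace passes by a single left-to-right scan that emits the mapped replacement for whichever enum name matches at the current position (the names are prefix-free and non-overlapping, so one pass equals the sequence).
import Mathlib
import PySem

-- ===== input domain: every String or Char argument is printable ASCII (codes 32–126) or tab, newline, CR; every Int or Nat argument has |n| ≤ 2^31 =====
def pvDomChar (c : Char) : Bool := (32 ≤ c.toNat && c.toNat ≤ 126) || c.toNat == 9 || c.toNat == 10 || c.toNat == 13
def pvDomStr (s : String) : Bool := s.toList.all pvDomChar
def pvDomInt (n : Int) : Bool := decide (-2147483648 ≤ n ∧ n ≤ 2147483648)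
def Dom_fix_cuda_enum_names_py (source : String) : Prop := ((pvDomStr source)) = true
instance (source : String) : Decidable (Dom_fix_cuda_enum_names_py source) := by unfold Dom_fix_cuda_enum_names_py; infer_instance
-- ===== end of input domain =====

-- B replaces A's five sequential guarded full-string str.replace passes by one
-- left-to-right scan that emits the mapped replacement for whichever enum name
-- matches at the current position (alternative decomposition, same cost).

-- ===== PORT A =====
-- the dict literal (association list in insertion order)
def pvEnumReplacements : List (String × String) :=
  [("cudaDevAttrMemoryBusWidth", "(enum cudaDeviceAttr)37"),
   ("cudaDevAttrGlobalMemoryBusWidth", "(enum cudaDeviceAttr)37"),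
   ("cudaDevAttrMemoryClockRate", "(enum cudaDeviceAttr)36"),
   ("cudaDevAttrClockRate", "(enum cudaDeviceAttr)13"),
   ("cudaDevAttrMultiProcessorCount", "(enum cudaDeviceAttr)16")]

-- for old_name, new_value in enum_replacements.items(): if old_name in source: source = source.replace(...)
def fix_cuda_enum_names_py (source : String) : String :=
  pvEnumReplacements.foldl
    (fun src kv => if PySem.Str.isIn kv.1 src then PySem.Str.replace src kv.1 kv.2 else src)
    source

-- ===== PORT B =====
-- B's dict, as (key, value) char lists
def pvKeys : List (List Char × List Char) :=
  [("cudaDevAttrMemoryBusWidth".toList, "(enum cudaDeviceAttr)37".toList),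
   ("cudaDevAttrGlobalMemoryBusWidth".toList, "(enum cudaDeviceAttr)37".toList),
   ("cudaDevAttrMemoryClockRate".toList, "(enum cudaDeviceAttr)36".toList),
   ("cudaDevAttrClockRate".toList, "(enum cudaDeviceAttr)13".toList),
   ("cudaDevAttrMultiProcessorCount".toList, "(enum cudaDeviceAttr)16".toList)]

-- the inner for/else loop: first key that matches at the current position,
-- returning (its value, the rest of the input after the match)
def pvFindMatch (K : List (List Char × List Char)) (s : List Char) :
    Option (List Char × List Char) :=
  match K with
  | [] => none
  | kv :: K' => if kv.1.isPrefixOf s then some (kv.2, s.drop kv.1.length) else pvFindMatch K' s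

-- the while loop (fuel = number of remaining characters; every step consumes ≥ 1)
def pvScan (K : List (List Char × List Char)) : Nat → List Char → List Char
  | _, [] => []
  | 0, _ :: _ => []
  | fuel+1, c :: t =>
    match pvFindMatch K (c :: t) with
    | some (v, rest) => v ++ pvScan K fuel rest
    | none => c :: pvScan K fuel t

def fix_cuda_enum_names_py_alt (source : String) : String :=
  String.ofList (pvScan pvKeys source.toList.length source.toList)

-- ===== PRECONDITION & SPEC =====
def Spec_fix_cuda_enum_names_py (source : String) (out : String) : Prop := out = fix_cuda_enum_names_py_alt source
instance (source : String) (out : String) : Decidable (Spec_fix_cuda_enum_names_py source out) := by unfold Spec_fix_cuda_enum_names_py; infer_instance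

-- ===== CLAIM (what is proved, stated in full; the proofs are below) =====
def Claim_equal_fix_cuda_enum_names_py : Prop := ∀ (source : String), Dom_fix_cuda_enum_names_py source → Spec_fix_cuda_enum_names_py source (fix_cuda_enum_names_py source)

-- ===== LEMMAS AND PROOFS =====

-- proof-side structural version of PySem.Chars.replace (for a nonempty pattern)
def pvRepScan (old new : List Char) (h : old ≠ []) : List Char → List Char
  | [] => []
  | c :: t =>
    if old.isPrefixOf (c :: t) then new ++ pvRepScan old new h ((c :: t).drop old.length)
    else c :: pvRepScan old new h t
termination_by s => s.length
decreasing_by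
  · cases old with
    | nil => exact absurd rfl h
    | cons o os => simp
  · simp

theorem pv_go_eq (old new : List Char) (h : old ≠ []) :
    ∀ fuel l acc, l.length ≤ fuel →
      PySem.Chars.replace.go old new fuel l acc = acc.reverse ++ pvRepScan old new h l := by
  intro fuel
  induction fuel with
  | zero =>
    intro l acc hl
    have : l = [] := List.eq_nil_of_length_eq_zero (Nat.le_zero.mp hl)
    subst this
    simp [PySem.Chars.replace.go, pvRepScan]
  | succ f ih =>
    intro l acc hl
    cases l with
    | nil => simp [PySem.Chars.replace.go, pvRepScan]
    | cons c t =>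
      rw [pvRepScan]
      by_cases hp : old.isPrefixOf (c :: t)
      · have hlen : ((c :: t).drop old.length).length ≤ f := by
          have : 0 < old.length := by cases old with
            | nil => exact absurd rfl h
            | cons o os => simp
          simp at hl ⊢
          omega
        simp only [PySem.Chars.replace.go, hp, if_pos]
        rw [ih _ _ hlen]
        simp
      · have hlen : t.length ≤ f := by simp at hl; omega
        simp only [PySem.Chars.replace.go, hp]
        rw [ih _ _ hlen]
        simp

theorem pv_replace_eq (old new : List Char) (h : old ≠ []) (s : List Char) :
    PySem.Chars.replace s old new = pvRepScan old new h s := by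
  unfold PySem.Chars.replace
  rw [if_neg (by simpa [List.isEmpty_iff] using h)]
  rw [pv_go_eq old new h s.length s [] le_rfl]
  simp

theorem pv_prefix_cases {u a b : List Char} (hu : u <+: a ++ b) : u <+: a ∨ a <+: u :=
  List.prefix_or_prefix_of_prefix hu (List.prefix_append a b)

theorem pv_repScan_of_not_infix (old new : List Char) (h : old ≠ []) :
    ∀ s, ¬ old <:+: s → pvRepScan old new h s = s := by
  intro s
  induction s using pvRepScan.induct old h with
  | case1 => intro _; simp [pvRepScan]
  | case2 c t hp _ =>
    intro hinf
    exact absurd (List.IsPrefix.isInfix (List.isPrefixOf_iff_prefix.mp hp)) hinf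
  | case3 c t hp ih =>
    intro hinf
    rw [pvRepScan, if_neg hp, ih (fun hi => hinf (List.infix_cons hi))]

theorem pv_repScan_append (old new : List Char) (h : old ≠ []) :
    ∀ b r, (∀ p, p < b.length → ¬ (old <+: b.drop p) ∧ ¬ (b.drop p <+: old)) →
      pvRepScan old new h (b ++ r) = b ++ pvRepScan old new h r := by
  intro b
  induction b with
  | nil => intro r _; rfl
  | cons x b' ih =>
    intro r hc
    have hnp : ¬ old.isPrefixOf (x :: (b' ++ r)) := by
      rw [List.isPrefixOf_iff_prefix]
      intro hpre
      rcases pv_prefix_cases (a := x :: b') (b := r) (by simpa using hpre) with h1 | h2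
      · exact (hc 0 (by simp)).1 h1
      · exact (hc 0 (by simp)).2 h2
    rw [List.cons_append, pvRepScan, if_neg hnp, ih r (fun p hp => hc (p+1) (by simp; omega))]
    simp

theorem pv_repScan_head (old new : List Char) (h : old ≠ []) (r : List Char) :
    pvRepScan old new h (old ++ r) = new ++ pvRepScan old new h r := by
  cases old with
  | nil => exact absurd rfl h
  | cons o os =>
    rw [List.cons_append, pvRepScan,
      if_pos (List.isPrefixOf_iff_prefix.mpr ⟨r, by simp⟩)]
    congr 1
    congr 1
    exact List.drop_left (l₁ := o :: os) (l₂ := r)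

-- replacement values start with '(' which occurs in no key, so a replacement
-- can never create a new key occurrence at an earlier position
theorem pv_np (old new : List Char) (h : old ≠ []) (hv : new.head? = some '(') :
    ∀ s u, ¬ u <+: s → '(' ∉ u → ¬ u <+: pvRepScan old new h s := by
  intro s
  induction s using pvRepScan.induct old h with
  | case1 =>
    intro u hns _ hp
    simp [pvRepScan] at hp
    exact hns (by simp [hp])
  | case2 c t hp ih =>
    intro u hns hnc hpre
    rw [pvRepScan, if_pos hp] at hpre
    cases u with
    | nil => exact hns (List.nil_prefix)
    | cons u0 u' =>
      have : u0 = '(' := by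
        cases new with
        | nil => simp at hv
        | cons n0 ns =>
          have hn0 : n0 = '(' := by simpa using hv
          rcases pv_prefix_cases hpre with h1 | h2
          · exact (List.cons_prefix_cons.mp h1).1.trans hn0
          · exact ((List.cons_prefix_cons.mp h2).1.symm).trans hn0
      exact hnc (by simp [this])
  | case3 c t hp ih =>
    intro u hns hnc hpre
    rw [pvRepScan, if_neg hp] at hpre
    cases u with
    | nil => exact hns (List.nil_prefix)
    | cons u0 u' =>
      rcases List.cons_prefix_cons.mp hpre with ⟨he, hu'⟩
      subst he
      have hns' : ¬ u' <+: t := fun hx => hns (List.cons_prefix_cons.mpr ⟨rfl, hx⟩)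
      exact ih u' hns' (fun hx => hnc (List.mem_cons_of_mem _ hx)) hu'

-- the composition of the five replace passes, generically
def pvCompC (K : List (List Char × List Char)) (s : List Char) : List Char :=
  K.foldl (fun l kv => PySem.Chars.replace l kv.1 kv.2) s

def pvGood (K : List (List Char × List Char)) : Prop :=
  ∀ kv ∈ K, kv.1 ≠ [] ∧ kv.2.head? = some '(' ∧ '(' ∉ kv.1
def pvCross (K : List (List Char × List Char)) : Prop :=
  ∀ kv ∈ K, ∀ kv' ∈ K, kv.1 ≠ kv'.1 →
    ∀ p, p < kv.1.length → ¬ (kv'.1 <+: kv.1.drop p) ∧ ¬ (kv.1.drop p <+: kv'.1)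
def pvVCross (K : List (List Char × List Char)) : Prop :=
  ∀ kv ∈ K, ∀ kv' ∈ K,
    ∀ p, p < kv.2.length → ¬ (kv'.1 <+: kv.2.drop p) ∧ ¬ (kv.2.drop p <+: kv'.1)

theorem pv_comp_nil (K : List (List Char × List Char)) (hK : ∀ kv ∈ K, kv.1 ≠ []) :
    pvCompC K [] = [] := by
  induction K with
  | nil => rfl
  | cons kv K' ih =>
    have h0 := hK kv (List.mem_cons_self)
    show pvCompC K' (PySem.Chars.replace [] kv.1 kv.2) = []
    rw [pv_replace_eq kv.1 kv.2 h0, pvRepScan]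
    exact ih (fun k hk => hK k (List.mem_cons_of_mem _ hk))

theorem pv_comp_append (K : List (List Char × List Char)) (b : List Char)
    (hK : ∀ kv ∈ K, kv.1 ≠ [])
    (hc : ∀ kv ∈ K, ∀ p, p < b.length → ¬ (kv.1 <+: b.drop p) ∧ ¬ (b.drop p <+: kv.1)) :
    ∀ r, pvCompC K (b ++ r) = b ++ pvCompC K r := by
  induction K with
  | nil => intro r; rfl
  | cons kv K' ih =>
    intro r
    have h0 := hK kv (List.mem_cons_self)
    show pvCompC K' (PySem.Chars.replace (b ++ r) kv.1 kv.2) = b ++ pvCompC K' (PySem.Chars.replace r kv.1 kv.2)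
    rw [pv_replace_eq kv.1 kv.2 h0,
      pv_repScan_append kv.1 kv.2 h0 b r (hc kv (List.mem_cons_self)),
      ← pv_replace_eq kv.1 kv.2 h0]
    exact ih (fun k hk => hK k (List.mem_cons_of_mem _ hk))
      (fun k hk => hc k (List.mem_cons_of_mem _ hk)) _

theorem pv_comp_cons (K : List (List Char × List Char)) (hg : pvGood K) (c : Char) :
    ∀ X, (∀ kv ∈ K, ¬ kv.1 <+: c :: X) → pvCompC K (c :: X) = c :: pvCompC K X := by
  induction K with
  | nil => intro X _; rfl
  | cons kv0 K' ih =>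
    intro X hnp
    have h0 := hg kv0 (List.mem_cons_self)
    have hstep : PySem.Chars.replace (c :: X) kv0.1 kv0.2 = c :: PySem.Chars.replace X kv0.1 kv0.2 := by
      rw [pv_replace_eq kv0.1 kv0.2 h0.1, pvRepScan,
        if_neg (fun hx => hnp kv0 (List.mem_cons_self) (List.isPrefixOf_iff_prefix.mp hx)),
        ← pv_replace_eq kv0.1 kv0.2 h0.1]
    show pvCompC K' (PySem.Chars.replace (c :: X) kv0.1 kv0.2) = c :: pvCompC K' (PySem.Chars.replace X kv0.1 kv0.2)
    rw [hstep]
    refine ih (fun k hk => hg k (List.mem_cons_of_mem _ hk)) _ ?_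
    intro kv hkv hpre
    have hk := hg kv (List.mem_cons_of_mem _ hkv)
    cases hkey : kv.1 with
    | nil => exact hk.1 hkey
    | cons d u =>
      rw [hkey] at hpre
      rcases List.cons_prefix_cons.mp hpre with ⟨he, hu⟩
      have horig : ¬ (d :: u) <+: c :: X := by rw [← hkey]; exact hnp kv (List.mem_cons_of_mem _ hkv)
      have hnu : ¬ u <+: X := fun hx => horig (List.cons_prefix_cons.mpr ⟨he, hx⟩)
      rw [pv_replace_eq kv0.1 kv0.2 h0.1] at hu
      exact pv_np kv0.1 kv0.2 h0.1 h0.2.1 X u hnu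
        (fun hx => hk.2.2 (by rw [hkey]; exact List.mem_cons_of_mem _ hx)) hu

theorem pv_findMatch_none {K : List (List Char × List Char)} {s : List Char}
    (h : pvFindMatch K s = none) : ∀ kv ∈ K, ¬ kv.1 <+: s := by
  induction K with
  | nil => intro kv hkv; simp at hkv
  | cons kv0 K' ih =>
    intro kv hkv
    rw [pvFindMatch] at h
    by_cases hp : kv0.1.isPrefixOf s
    · simp [hp] at h
    · rcases List.mem_cons.mp hkv with he | hm
      · subst he; exact fun hx => hp (List.isPrefixOf_iff_prefix.mpr hx)
      · exact ih (by simpa [hp] using h) kv hm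

theorem pv_findMatch_some {K : List (List Char × List Char)} {s v rest : List Char}
    (h : pvFindMatch K s = some (v, rest)) :
    ∃ K1 kv K2, K = K1 ++ kv :: K2 ∧ kv.1 <+: s ∧ kv.2 = v ∧
      rest = s.drop kv.1.length ∧ ∀ kv' ∈ K1, ¬ kv'.1 <+: s := by
  induction K with
  | nil => simp [pvFindMatch] at h
  | cons kv0 K' ih =>
    rw [pvFindMatch] at h
    by_cases hp : kv0.1.isPrefixOf s
    · refine ⟨[], kv0, K', by simp, List.isPrefixOf_iff_prefix.mp hp, ?_, ?_, by simp⟩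
      · simp [hp] at h; exact h.1
      · simp [hp] at h; exact h.2.symm
    · rcases ih (by simpa [hp] using h) with ⟨K1, kv, K2, he, h1, h2, h3, h4⟩
      refine ⟨kv0 :: K1, kv, K2, by rw [he, List.cons_append], h1, h2, h3, ?_⟩
      intro kv' hkv'
      rcases List.mem_cons.mp hkv' with he' | hm'
      · subst he'; exact fun hx => hp (List.isPrefixOf_iff_prefix.mpr hx)
      · exact h4 kv' hm'

theorem pv_main (K : List (List Char × List Char)) (hg : pvGood K) (hx : pvCross K)
    (hvx : pvVCross K) :
    ∀ n s fuel, s.length ≤ n → s.length ≤ fuel → pvCompC K s = pvScan K fuel s := by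
  intro n
  induction n with
  | zero =>
    intro s fuel hn _
    have : s = [] := List.eq_nil_of_length_eq_zero (Nat.le_zero.mp hn)
    subst this
    rw [pv_comp_nil K (fun kv hkv => (hg kv hkv).1)]
    cases fuel <;> rfl
  | succ n ih =>
    intro s fuel hn hf
    cases s with
    | nil =>
      rw [pv_comp_nil K (fun kv hkv => (hg kv hkv).1)]
      cases fuel <;> rfl
    | cons c t =>
      cases fuel with
      | zero => simp at hf
      | succ f =>
        cases hm : pvFindMatch K (c :: t) with
        | none =>
          rw [pvScan, hm]
          rw [pv_comp_cons K hg c t (pv_findMatch_none hm)]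
          congr 1
          exact ih t f (by simp at hn; omega) (by simp at hf; omega)
        | some vr =>
          obtain ⟨v, rest⟩ := vr
          rcases pv_findMatch_some hm with ⟨K1, kv, K2, hKeq, hpre, hveq, hrest, hK1⟩
          have hmem : kv ∈ K := by rw [hKeq]; exact List.mem_append_right _ List.mem_cons_self
          have hk0 := hg kv hmem
          obtain ⟨r, hr⟩ := hpre
          have hrestr : rest = r := by
            rw [hrest, ← hr]; exact List.drop_left
          have hK1mem : ∀ k ∈ K1, k ∈ K := fun k hk => by
            rw [hKeq]; exact List.mem_append_left _ hk
          have hK2mem : ∀ k ∈ K2, k ∈ K := fun k hk => by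
            rw [hKeq]; exact List.mem_append_right _ (List.mem_cons_of_mem _ hk)
          -- lengths
          have hkl : 0 < kv.1.length := List.length_pos_iff.mpr hk0.1
          have hlen : kv.1.length + r.length = t.length + 1 := by
            have := congrArg List.length hr; simpa using this
          -- decompose the fold
          have hsplit : ∀ z, pvCompC K z = pvCompC K2 (PySem.Chars.replace (pvCompC K1 z) kv.1 kv.2) := by
            intro z; rw [hKeq]; simp [pvCompC, List.foldl_append]
          -- K1 skips over kv.1
          have hcomp1 : pvCompC K1 (kv.1 ++ r) = kv.1 ++ pvCompC K1 r := by
            refine pv_comp_append K1 kv.1 (fun k hk => (hg k (hK1mem k hk)).1) ?_ r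
            intro k hk p hp
            have hne : kv.1 ≠ k.1 := by
              intro he
              exact hK1 k hk (by rw [← he, ← hr]; exact ⟨r, rfl⟩)
            exact hx kv hmem k (hK1mem k hk) hne p hp
          -- the matched key replaces
          have hstep : PySem.Chars.replace (kv.1 ++ pvCompC K1 r) kv.1 kv.2
              = kv.2 ++ PySem.Chars.replace (pvCompC K1 r) kv.1 kv.2 := by
            rw [pv_replace_eq kv.1 kv.2 hk0.1, pv_repScan_head, ← pv_replace_eq kv.1 kv.2 hk0.1]
          -- K2 skips over kv.2
          have hcomp2 : ∀ y, pvCompC K2 (kv.2 ++ y) = kv.2 ++ pvCompC K2 y := by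
            refine pv_comp_append K2 kv.2 (fun k hk => (hg k (hK2mem k hk)).1) ?_
            intro k hk p hp
            exact hvx kv hmem k (hK2mem k hk) p hp
          have hL : pvCompC K (c :: t) = kv.2 ++ pvCompC K r := by
            rw [← hr, hsplit, hcomp1, hstep, hcomp2, ← hsplit]
          rw [pvScan, hm, hL, ← hveq, hrestr]
          congr 1
          exact ih r f (by simp at hn; omega) (by simp at hf; omega)

-- bridge: port A's fold, on .toList
theorem pv_stepA (s k v : String) (hk : k.toList ≠ []) :
    (if PySem.Str.isIn k s then PySem.Str.replace s k v else s).toList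
      = PySem.Chars.replace s.toList k.toList v.toList := by
  split_ifs with hin
  · exact PySem.Str.toList_replace s k v
  · have hfal : PySem.Chars.isIn k.toList s.toList = false := by
      rw [← PySem.Str.isIn_eq]
      simpa using hin
    rw [pv_replace_eq k.toList v.toList hk,
      pv_repScan_of_not_infix k.toList v.toList hk s.toList
        ((PySem.Chars.isIn_eq_false_iff _ _).mp hfal)]

theorem pv_foldA (K : List (String × String)) (hK : ∀ kv ∈ K, kv.1.toList ≠ []) :
    ∀ s : String,
      (K.foldl (fun src kv => if PySem.Str.isIn kv.1 src then PySem.Str.replace src kv.1 kv.2 else src) s).toList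
        = pvCompC (K.map fun kv => (kv.1.toList, kv.2.toList)) s.toList := by
  induction K with
  | nil => intro s; rfl
  | cons kv K' ih =>
    intro s
    have h0 := hK kv (List.mem_cons_self)
    show (K'.foldl _ (if PySem.Str.isIn kv.1 s then PySem.Str.replace s kv.1 kv.2 else s)).toList
      = pvCompC _ (PySem.Chars.replace s.toList kv.1.toList kv.2.toList)
    rw [← pv_stepA s kv.1 kv.2 h0]
    exact ih (fun k hk => hK k (List.mem_cons_of_mem _ hk)) _

-- ===== VERDICT (by name: the statement is the Claim_ definition above) =====
theorem fix_cuda_enum_names_py_spec : Claim_equal_fix_cuda_enum_names_py := by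
  intro source _
  unfold Spec_fix_cuda_enum_names_py
  rw [← String.toList_inj]
  have hA : (fix_cuda_enum_names_py source).toList = pvCompC pvKeys source.toList := by
    have := pv_foldA pvEnumReplacements (by decide) source
    rw [fix_cuda_enum_names_py, this]
    rfl
  have hB : (fix_cuda_enum_names_py_alt source).toList
      = pvScan pvKeys source.toList.length source.toList := by
    rw [fix_cuda_enum_names_py_alt]
    exact String.toList_ofList
  rw [hA, hB]
  exact pv_main pvKeys (by unfold pvGood; decide) (by unfold pvCross; decide) (by unfold pvVCross; decide)
    source.toList.length source.toList source.toList.length le_rfl le_rfl
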